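-- pv_equiv track=rewrite | github.com/JoshBarber2023/Abstraction-and-Reasoning-Corpus---Classification-Method | rules/commonsense.py | check_checkerboard_pattern
-- ===== SOURCE A (Python) =====
-- def check_checkerboard_pattern(inp, out, inp_objs=None, out_objs=None):
--     """
--     Checks if the output grid is a checkerboard pattern.
--
--     Args:
--         inp (Grid): The input grid.
--         out (Grid): The output grid.
--         inp_objs (Objects, optional): Objects in the input grid.
--         out_objs (Objects, optional): Objects in the output grid.
--
--     Returns:
--         Boolean: True if the output grid forms a checkerboard pattern, False otherwise.
--     """
--
--     rows = len(out)
--     cols = len(out[0])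
--
--     # Check if the output grid forms a checkerboard pattern
--     for r in range(rows):
--         for c in range(cols):
--             # Check if alternating pattern holds
--             if (r + c) % 2 == 0:
--                 if out[r][c] != out[0][0]:  # Compare with the top-left corner
--                     return False
--             else:
--                 if out[r][c] == out[0][0]:  # Compare with the top-left corner
--                     return False
--     return True
-- ===== SOURCE B (Python) =====
-- def check_checkerboard_pattern(inp, out, inp_objs=None, out_objs=None):
--     cols = len(out[0])
--     evens = set()
--     odds = set()
--     for r, row in enumerate(out):
--         for c, v in enumerate(row[:cols]):
--             (evens if (r + c) % 2 == 0 else odds).add(v)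
--     return len(evens) == 1 and evens.isdisjoint(odds)
-- ===== Notes on version B (the rewrite author's own statement) =====
-- stated objective: alternative
-- what changed: Replaces A's early-returning per-cell corner-comparison scan with a gather-then-verify pass: one sweep collects the sets of values on even- and odd-parity cells of the cols-wide grid, then checks the even set is a singleton disjoint from the odd set; Pre_ excludes empty grids (A raises), zero-column grids (A's vacuous True vs B's False on a grid with no cells is a degenerate corner), and ragged grids whose first row is clean, where whether A raises or early-returns is not a closed-form shape condition.
-- outside the precondition, e.g. on check_checkerboard_pattern([], [[]], None, None): A returns True, B returns False; on check_checkerboard_pattern([], [[1, 0], [1]], None, None): A returns False, B returns False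
import Mathlib
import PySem

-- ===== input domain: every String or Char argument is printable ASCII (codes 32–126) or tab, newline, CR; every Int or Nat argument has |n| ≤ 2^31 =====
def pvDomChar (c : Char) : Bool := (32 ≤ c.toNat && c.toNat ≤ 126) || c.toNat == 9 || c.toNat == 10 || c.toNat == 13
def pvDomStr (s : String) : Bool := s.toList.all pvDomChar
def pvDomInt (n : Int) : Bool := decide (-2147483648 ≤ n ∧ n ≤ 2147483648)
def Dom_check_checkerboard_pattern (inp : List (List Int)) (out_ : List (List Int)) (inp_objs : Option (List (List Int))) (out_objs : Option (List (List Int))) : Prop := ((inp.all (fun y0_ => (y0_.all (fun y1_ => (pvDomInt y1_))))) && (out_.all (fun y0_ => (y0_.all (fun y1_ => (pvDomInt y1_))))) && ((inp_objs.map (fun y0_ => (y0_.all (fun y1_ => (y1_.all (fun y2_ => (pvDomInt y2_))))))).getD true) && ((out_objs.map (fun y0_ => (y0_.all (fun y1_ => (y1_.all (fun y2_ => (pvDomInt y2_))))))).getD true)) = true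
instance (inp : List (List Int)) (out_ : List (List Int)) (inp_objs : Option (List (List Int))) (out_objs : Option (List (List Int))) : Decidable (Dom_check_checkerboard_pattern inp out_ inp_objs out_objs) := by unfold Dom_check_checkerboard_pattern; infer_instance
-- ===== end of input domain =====

-- B replaces A's early-returning per-cell corner-comparison scan by a gather-then-verify pass:
-- it collects the value sets of even- and odd-parity cells of the cols-wide grid and checks the
-- even set is a singleton disjoint from the odd set (objective: alternative; same asymptotic cost).

-- ===== PORT A =====
-- inner loop 'for c in range(cols)' with its two early 'return False' branches
def ccA_loopC (out_ : List (List Int)) (anchor : Int) (r : Int) : List Int → Bool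
  | [] => true
  | c :: cs =>
    if PySem.Int.mod (r + c) 2 == 0 then
      if (PySem.List.pyGetD (PySem.List.pyGetD out_ r []) c 0) != anchor then false
      else ccA_loopC out_ anchor r cs
    else
      if (PySem.List.pyGetD (PySem.List.pyGetD out_ r []) c 0) == anchor then false
      else ccA_loopC out_ anchor r cs

-- outer loop 'for r in range(rows)'
def ccA_loopR (out_ : List (List Int)) (anchor : Int) (cols : Int) : List Int → Bool
  | [] => true
  | r :: rs =>
    if ccA_loopC out_ anchor r (PySem.List.pyRange 0 cols 1) then ccA_loopR out_ anchor cols rs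
    else false

def check_checkerboard_pattern (inp : List (List Int)) (out_ : List (List Int)) (inp_objs : Option (List (List Int))) (out_objs : Option (List (List Int))) : Bool :=
  let rows : Int := out_.length
  let cols : Int := (out_.headD []).length          -- len(out[0]); Pre_ guarantees out ≠ []
  let anchor : Int := (out_.headD []).headD 0       -- out[0][0]; Pre_ guarantees the indexing is in range
  ccA_loopR out_ anchor cols (PySem.List.pyRange 0 rows 1)

-- ===== PORT B =====
-- body of 'for c, v in enumerate(row[:cols])': add v to evens or odds by parity of r + c
def ccB_cell (r : Int) (st : PySem.Set Int × PySem.Set Int) (q : Int × Int) : PySem.Set Int × PySem.Set Int :=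
  if PySem.Int.mod (r + q.1) 2 == 0 then (PySem.Set.add st.1 q.2, st.2) else (st.1, PySem.Set.add st.2 q.2)

-- body of 'for r, row in enumerate(out)'
def ccB_row (cols : Int) (st : PySem.Set Int × PySem.Set Int) (p : Int × List Int) : PySem.Set Int × PySem.Set Int :=
  (PySem.List.enumerate (PySem.List.slice p.2 none (some cols)) 0).foldl (ccB_cell p.1) st

def check_checkerboard_pattern_alt (inp : List (List Int)) (out_ : List (List Int)) (inp_objs : Option (List (List Int))) (out_objs : Option (List (List Int))) : Bool :=
  let cols : Int := (out_.headD []).length          -- len(out[0]); Pre_ guarantees out ≠ []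
  let st := (PySem.List.enumerate out_ 0).foldl (ccB_row cols) ((PySem.Set.empty : PySem.Set Int), (PySem.Set.empty : PySem.Set Int))
  (PySem.Set.len st.1 == 1) && PySem.Set.isdisjoint st.1 st.2

-- ===== PRECONDITION & SPEC =====
-- Pre_ excludes inputs where A's row-major early-exit meets a missing or non-existent cell:
-- empty grids (A raises IndexError at out[0]), zero-column grids (A's loops are vacuous and it
-- returns an accidental True where B reports that a grid with no cells is no checkerboard), and
-- ragged grids whose first row is itself clean — there whether A raises IndexError at a short
-- row or early-returns False first is not a closed-form shape condition, so of the ragged grids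
-- Pre_ keeps only those whose first row already breaks the pattern (A then returns False inside
-- row 0, before any short row is reached).
def Pre_check_checkerboard_pattern (inp : List (List Int)) (out_ : List (List Int)) (inp_objs : Option (List (List Int))) (out_objs : Option (List (List Int))) : Prop :=
  out_ ≠ [] ∧ (out_.headD []) ≠ [] ∧
    ((∀ row ∈ out_, (out_.headD []).length ≤ row.length) ∨
     (∃ c < (out_.headD []).length,
        (c % 2 = 0 ∧ (out_.headD []).getD c 0 ≠ (out_.headD []).getD 0 0) ∨
        (c % 2 = 1 ∧ (out_.headD []).getD c 0 = (out_.headD []).getD 0 0)))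
instance (inp : List (List Int)) (out_ : List (List Int)) (inp_objs : Option (List (List Int))) (out_objs : Option (List (List Int))) : Decidable (Pre_check_checkerboard_pattern inp out_ inp_objs out_objs) := by unfold Pre_check_checkerboard_pattern; infer_instance

def pvWitness_check_checkerboard_pattern : List (List Int) × List (List Int) × Option (List (List Int)) × Option (List (List Int)) :=
  ([], [[1, 0], [0, 1]], none, none)

def Spec_check_checkerboard_pattern (inp : List (List Int)) (out_ : List (List Int)) (inp_objs : Option (List (List Int))) (out_objs : Option (List (List Int))) (out : Bool) : Prop := out = check_checkerboard_pattern_alt inp out_ inp_objs out_objs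
instance (inp : List (List Int)) (out_ : List (List Int)) (inp_objs : Option (List (List Int))) (out_objs : Option (List (List Int))) (out : Bool) : Decidable (Spec_check_checkerboard_pattern inp out_ inp_objs out_objs out) := by unfold Spec_check_checkerboard_pattern; infer_instance

-- ===== CLAIM (what is proved, stated in full; the proofs are below) =====
def Claim_equal_check_checkerboard_pattern : Prop := ∀ (inp : List (List Int)) (out_ : List (List Int)) (inp_objs : Option (List (List Int))) (out_objs : Option (List (List Int))), Dom_check_checkerboard_pattern inp out_ inp_objs out_objs → Pre_check_checkerboard_pattern inp out_ inp_objs out_objs → Spec_check_checkerboard_pattern inp out_ inp_objs out_objs (check_checkerboard_pattern inp out_ inp_objs out_objs)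

-- ===== LEMMAS AND PROOFS =====

-- the per-cell condition A checks
def cellOK (out_ : List (List Int)) (anchor r c : Int) : Bool :=
  if PySem.Int.mod (r + c) 2 == 0 then PySem.List.pyGetD (PySem.List.pyGetD out_ r []) c 0 == anchor
  else PySem.List.pyGetD (PySem.List.pyGetD out_ r []) c 0 != anchor

theorem ccA_loopC_eq_all (out_ : List (List Int)) (anchor r : Int) (cs : List Int) :
    ccA_loopC out_ anchor r cs = cs.all (cellOK out_ anchor r) := by
  induction cs with
  | nil => rfl
  | cons c cs ih =>
    simp only [ccA_loopC, List.all_cons, cellOK]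
    split_ifs with h1 h2 h2 <;> simp_all [bne]

theorem ccA_loopR_eq_all (out_ : List (List Int)) (anchor cols : Int) (rs : List Int) :
    ccA_loopR out_ anchor cols rs = rs.all (fun r => ccA_loopC out_ anchor r (PySem.List.pyRange 0 cols 1)) := by
  induction rs with
  | nil => rfl
  | cons r rs ih =>
    simp only [ccA_loopR, List.all_cons]
    split_ifs with h <;> simp [h, ih]

theorem mem_cellfold (r : Int) (qs : List (Int × Int)) (st : PySem.Set Int × PySem.Set Int) (x : Int) :
    (x ∈ (qs.foldl (ccB_cell r) st).1 ↔ x ∈ st.1 ∨ ∃ q ∈ qs, PySem.Int.mod (r + q.1) 2 = 0 ∧ q.2 = x) ∧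
    (x ∈ (qs.foldl (ccB_cell r) st).2 ↔ x ∈ st.2 ∨ ∃ q ∈ qs, PySem.Int.mod (r + q.1) 2 ≠ 0 ∧ q.2 = x) := by
  induction qs generalizing st with
  | nil => simp
  | cons q qs ih =>
    simp only [List.foldl_cons, ccB_cell]
    cases hb : (PySem.Int.mod (r + q.1) 2 == 0) with
    | true =>
      have h : PySem.Int.mod (r + q.1) 2 = 0 := by simpa using hb
      rw [if_pos rfl]
      constructor
      · rw [(ih _).1]
        simp only [PySem.Set.mem_add, List.mem_cons]
        constructor
        · rintro ((hs | hx) | ⟨q', hq', hp, hv⟩)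
          · exact Or.inl hs
          · exact Or.inr ⟨q, Or.inl rfl, h, hx.symm⟩
          · exact Or.inr ⟨q', Or.inr hq', hp, hv⟩
        · rintro (hs | ⟨q', (rfl | hq'), hp, hv⟩)
          · exact Or.inl (Or.inl hs)
          · exact Or.inl (Or.inr hv.symm)
          · exact Or.inr ⟨q', hq', hp, hv⟩
      · rw [(ih _).2]
        simp only [List.mem_cons]
        constructor
        · rintro (hs | ⟨q', hq', hp, hv⟩)
          · exact Or.inl hs
          · exact Or.inr ⟨q', Or.inr hq', hp, hv⟩
        · rintro (hs | ⟨q', (rfl | hq'), hp, hv⟩)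
          · exact Or.inl hs
          · exact absurd h hp
          · exact Or.inr ⟨q', hq', hp, hv⟩
    | false =>
      have h : PySem.Int.mod (r + q.1) 2 ≠ 0 := by simpa using hb
      rw [if_neg (by simp [hb])]
      constructor
      · rw [(ih _).1]
        simp only [List.mem_cons]
        constructor
        · rintro (hs | ⟨q', hq', hp, hv⟩)
          · exact Or.inl hs
          · exact Or.inr ⟨q', Or.inr hq', hp, hv⟩
        · rintro (hs | ⟨q', (rfl | hq'), hp, hv⟩)
          · exact Or.inl hs
          · exact absurd hp h
          · exact Or.inr ⟨q', hq', hp, hv⟩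
      · rw [(ih _).2]
        simp only [PySem.Set.mem_add, List.mem_cons]
        constructor
        · rintro ((hs | hx) | ⟨q', hq', hp, hv⟩)
          · exact Or.inl hs
          · exact Or.inr ⟨q, Or.inl rfl, h, hx.symm⟩
          · exact Or.inr ⟨q', Or.inr hq', hp, hv⟩
        · rintro (hs | ⟨q', (rfl | hq'), hp, hv⟩)
          · exact Or.inl (Or.inl hs)
          · exact Or.inl (Or.inr hv.symm)
          · exact Or.inr ⟨q', hq', hp, hv⟩

theorem mem_rowfold (colsI : Int) (ps : List (Int × List Int)) (st : PySem.Set Int × PySem.Set Int) (x : Int) :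
    (x ∈ (ps.foldl (ccB_row colsI) st).1 ↔ x ∈ st.1 ∨ ∃ p ∈ ps, ∃ q ∈ PySem.List.enumerate (PySem.List.slice p.2 none (some colsI)) 0, PySem.Int.mod (p.1 + q.1) 2 = 0 ∧ q.2 = x) ∧
    (x ∈ (ps.foldl (ccB_row colsI) st).2 ↔ x ∈ st.2 ∨ ∃ p ∈ ps, ∃ q ∈ PySem.List.enumerate (PySem.List.slice p.2 none (some colsI)) 0, PySem.Int.mod (p.1 + q.1) 2 ≠ 0 ∧ q.2 = x) := by
  induction ps generalizing st with
  | nil => simp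
  | cons p ps ih =>
    simp only [List.foldl_cons]
    constructor
    · rw [(ih _).1, ccB_row, (mem_cellfold p.1 _ st x).1]
      simp only [List.mem_cons]
      constructor
      · rintro ((hs | ⟨q, hq, hh⟩) | ⟨p', hp', hh⟩)
        · exact Or.inl hs
        · exact Or.inr ⟨p, Or.inl rfl, q, hq, hh⟩
        · exact Or.inr ⟨p', Or.inr hp', hh⟩
      · rintro (hs | ⟨p', (rfl | hp'), hh⟩)
        · exact Or.inl (Or.inl hs)
        · exact Or.inl (Or.inr hh)
        · exact Or.inr ⟨p', hp', hh⟩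
    · rw [(ih _).2, ccB_row, (mem_cellfold p.1 _ st x).2]
      simp only [List.mem_cons]
      constructor
      · rintro ((hs | ⟨q, hq, hh⟩) | ⟨p', hp', hh⟩)
        · exact Or.inl hs
        · exact Or.inr ⟨p, Or.inl rfl, q, hq, hh⟩
        · exact Or.inr ⟨p', Or.inr hp', hh⟩
      · rintro (hs | ⟨p', (rfl | hp'), hh⟩)
        · exact Or.inl (Or.inl hs)
        · exact Or.inl (Or.inr hh)
        · exact Or.inr ⟨p', hp', hh⟩

theorem nodup_cellfold (r : Int) (qs : List (Int × Int)) (st : PySem.Set Int × PySem.Set Int)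
    (h1 : st.1.Nodup) (h2 : st.2.Nodup) :
    (qs.foldl (ccB_cell r) st).1.Nodup ∧ (qs.foldl (ccB_cell r) st).2.Nodup := by
  induction qs generalizing st with
  | nil => exact ⟨h1, h2⟩
  | cons q qs ih =>
    simp only [List.foldl_cons, ccB_cell]
    split_ifs
    · exact ih _ (PySem.Set.nodup_add _ _ h1) h2
    · exact ih _ h1 (PySem.Set.nodup_add _ _ h2)

theorem nodup_rowfold (colsI : Int) (ps : List (Int × List Int)) (st : PySem.Set Int × PySem.Set Int)
    (h1 : st.1.Nodup) (h2 : st.2.Nodup) :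
    (ps.foldl (ccB_row colsI) st).1.Nodup ∧ (ps.foldl (ccB_row colsI) st).2.Nodup := by
  induction ps generalizing st with
  | nil => exact ⟨h1, h2⟩
  | cons p ps ih =>
    simp only [List.foldl_cons, ccB_row]
    obtain ⟨n1, n2⟩ := nodup_cellfold p.1 _ st h1 h2
    exact ih _ n1 n2

theorem pv_mod_two_natCast (c : Nat) : PySem.Int.mod (c : Int) 2 = ((c % 2 : Nat) : Int) := by
  exact_mod_cast PySem.Int.mod_natCast c 2

-- a nodup list whose members are all a, containing a, is [a]
theorem eq_singleton_of_nodup (a : Int) (l : List Int) (hn : l.Nodup) (hall : ∀ x ∈ l, x = a)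
    (hmem : a ∈ l) : l = [a] := by
  cases l with
  | nil => cases hmem
  | cons b l' =>
    have hb : b = a := hall b (List.mem_cons_self)
    subst hb
    have : l' = [] := by
      cases l' with
      | nil => rfl
      | cons c l'' =>
        have hc : c = b := hall c (by simp)
        subst hc
        simp at hn
    simp [this]

-- ===== VERDICT (by name: the statement is the Claim_ definition above) =====
theorem check_checkerboard_pattern_spec : Claim_equal_check_checkerboard_pattern := by
  intro inp out_ inp_objs out_objs _ hpre
  obtain ⟨hne, hne0, hrest⟩ := hpre
  unfold Spec_check_checkerboard_pattern
  cases out_ with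
  | nil => exact absurd rfl hne
  | cons row0 rest =>
    cases row0 with
    | nil => exact (hne0 (by simp)).elim
    | cons a t =>
      simp only [List.headD_cons] at hrest
      simp only [check_checkerboard_pattern, check_checkerboard_pattern_alt]
      simp only [List.headD_cons]
      set G : List (List Int) := (a :: t) :: rest with hG
      set cols : Nat := (a :: t).length with hcols
      set st := (PySem.List.enumerate G 0).foldl (ccB_row (cols : Int)) ((PySem.Set.empty : PySem.Set Int), (PySem.Set.empty : PySem.Set Int)) with hst
      -- membership characterisations over the cols-truncated rows
      have hE : ∀ x : Int, x ∈ st.1 ↔ ∃ (k : Nat) (_ : k < G.length) (c : Nat) (_ : c < (G[k].take cols).length),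
          PySem.Int.mod ((k : Int) + (c : Int)) 2 = 0 ∧ (G[k].take cols)[c] = x := by
        intro x
        rw [hst, (mem_rowfold _ _ _ x).1]
        simp only [PySem.Set.empty, List.not_mem_nil, false_or, PySem.List.slice_to_natCast]
        constructor
        · rintro ⟨p, hp, q, hq, hpar, hv⟩
          obtain ⟨k, hk, rfl⟩ := (PySem.List.mem_enumerate_iff _ _ _).mp hp
          obtain ⟨c, hc, rfl⟩ := (PySem.List.mem_enumerate_iff _ _ _).mp hq
          simp only [zero_add] at hpar hv ⊢
          exact ⟨k, hk, c, hc, hpar, hv⟩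
        · rintro ⟨k, hk, c, hc, hpar, hv⟩
          exact ⟨((k : Int), G[k]), (PySem.List.mem_enumerate_iff _ _ _).mpr ⟨k, hk, by simp⟩,
            ((c : Int), (G[k].take cols)[c]), (PySem.List.mem_enumerate_iff _ _ _).mpr ⟨c, hc, by simp⟩,
            by simpa using hpar, by simpa using hv⟩
      have hO : ∀ x : Int, x ∈ st.2 ↔ ∃ (k : Nat) (_ : k < G.length) (c : Nat) (_ : c < (G[k].take cols).length),
          PySem.Int.mod ((k : Int) + (c : Int)) 2 ≠ 0 ∧ (G[k].take cols)[c] = x := by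
        intro x
        rw [hst, (mem_rowfold _ _ _ x).2]
        simp only [PySem.Set.empty, List.not_mem_nil, false_or, PySem.List.slice_to_natCast]
        constructor
        · rintro ⟨p, hp, q, hq, hpar, hv⟩
          obtain ⟨k, hk, rfl⟩ := (PySem.List.mem_enumerate_iff _ _ _).mp hp
          obtain ⟨c, hc, rfl⟩ := (PySem.List.mem_enumerate_iff _ _ _).mp hq
          simp only [zero_add] at hpar hv ⊢
          exact ⟨k, hk, c, hc, hpar, hv⟩
        · rintro ⟨k, hk, c, hc, hpar, hv⟩
          exact ⟨((k : Int), G[k]), (PySem.List.mem_enumerate_iff _ _ _).mpr ⟨k, hk, by simp⟩,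
            ((c : Int), (G[k].take cols)[c]), (PySem.List.mem_enumerate_iff _ _ _).mpr ⟨c, hc, by simp⟩,
            by simpa using hpar, by simpa using hv⟩
      have hnod : st.1.Nodup ∧ st.2.Nodup :=
        nodup_rowfold _ _ _ List.nodup_nil List.nodup_nil
      have hGlen : 0 < G.length := by simp [hG]
      have hrow0 : G[0]'hGlen = a :: t := rfl
      have htake0 : (G[0]'hGlen).take cols = a :: t := by rw [hrow0, hcols, List.take_length]
      -- a is the value of the even cell (0,0)
      have ha_mem : a ∈ st.1 := by
        rw [hE]
        exact ⟨0, hGlen, 0, by rw [htake0]; simp, by decide, by exact (List.getElem_of_eq htake0 _).trans rfl⟩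
      -- the per-cell conditions, A-style
      have hcell_iff : ∀ (k : Nat) (hk : k < G.length) (c : Int),
          cellOK G a (↑k) c =
            (if PySem.Int.mod (↑k + c) 2 == 0 then PySem.List.pyGetD (G[k]) c 0 == a
             else PySem.List.pyGetD (G[k]) c 0 != a) := by
        intro k hk c
        unfold cellOK
        rw [PySem.List.pyGetD_natCast, List.getD_eq_getElem _ _ hk]
      cases hrest with
      | inl hshape =>
        -- every row has at least cols entries: both programs read exactly the cells (k, c), c < cols
        have htlen : ∀ (k : Nat) (hk : k < G.length), (G[k].take cols).length = cols := by
          intro k hk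
          rw [List.length_take]
          exact Nat.min_eq_left (hshape G[k] (List.getElem_mem hk))
        have htget : ∀ (k : Nat) (hk : k < G.length) (c : Nat) (hc : c < cols),
            (G[k].take cols)[c]'(by rw [htlen k hk]; exact hc) =
              G[k][c]'(Nat.lt_of_lt_of_le hc (hshape G[k] (List.getElem_mem hk))) := by
          intro k hk c hc
          exact List.getElem_take
        rw [Bool.eq_iff_iff, ccA_loopR_eq_all]
        simp only [List.all_eq_true, ccA_loopC_eq_all, Bool.and_eq_true, beq_iff_eq,
          PySem.Set.isdisjoint_iff]
        constructor
        · -- A true → B true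
          intro hA
          have hEa : ∀ x ∈ st.1, x = a := by
            intro x hx
            obtain ⟨k, hk, c, hc, hpar, hv⟩ := (hE x).mp hx
            have hclen : c < cols := by rw [← htlen k hk]; exact hc
            have hr : (↑k : Int) ∈ PySem.List.pyRange 0 ((G.length : Nat) : Int) 1 := by
              rw [PySem.List.mem_pyRange_one]; exact ⟨by positivity, by exact_mod_cast hk⟩
            have hcr : (↑c : Int) ∈ PySem.List.pyRange 0 ((cols : Nat) : Int) 1 := by
              rw [PySem.List.mem_pyRange_one]; exact ⟨by positivity, by exact_mod_cast hclen⟩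
            have hcv := hA _ hr _ hcr
            rw [hcell_iff k hk, if_pos (beq_iff_eq.mpr hpar)] at hcv
            rw [PySem.List.pyGetD_natCast,
              List.getD_eq_getElem _ _ (Nat.lt_of_lt_of_le hclen (hshape G[k] (List.getElem_mem hk)))] at hcv
            rw [← hv, htget k hk c hclen]
            exact beq_iff_eq.mp hcv
          have hOa : ∀ x ∈ st.2, x ≠ a := by
            intro x hx
            obtain ⟨k, hk, c, hc, hpar, hv⟩ := (hO x).mp hx
            have hclen : c < cols := by rw [← htlen k hk]; exact hc
            have hr : (↑k : Int) ∈ PySem.List.pyRange 0 ((G.length : Nat) : Int) 1 := by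
              rw [PySem.List.mem_pyRange_one]; exact ⟨by positivity, by exact_mod_cast hk⟩
            have hcr : (↑c : Int) ∈ PySem.List.pyRange 0 ((cols : Nat) : Int) 1 := by
              rw [PySem.List.mem_pyRange_one]; exact ⟨by positivity, by exact_mod_cast hclen⟩
            have hcv := hA _ hr _ hcr
            rw [hcell_iff k hk, if_neg (fun h => hpar (beq_iff_eq.mp h))] at hcv
            rw [PySem.List.pyGetD_natCast,
              List.getD_eq_getElem _ _ (Nat.lt_of_lt_of_le hclen (hshape G[k] (List.getElem_mem hk)))] at hcv
            rw [← hv, htget k hk c hclen]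
            exact bne_iff_ne.mp hcv
          have hsing : st.1 = [a] := eq_singleton_of_nodup a st.1 hnod.1 hEa ha_mem
          refine ⟨?_, ?_⟩
          · simp [PySem.Set.len, hsing]
          · intro x hx
            rw [hEa x hx]
            intro hmem
            exact hOa a hmem rfl
        · -- B true → A true
          rintro ⟨hlen1, hdisj⟩ r hr c hc
          have hsing : st.1 = [a] := by
            have hl1 : st.1.length = 1 := by
              simp only [PySem.Set.len] at hlen1
              omega
            obtain ⟨x, hx⟩ := List.length_eq_one_iff.mp hl1
            rw [hx] at ha_mem
            simp at ha_mem
            rw [hx, ha_mem]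
          rw [PySem.List.mem_pyRange_one] at hr hc
          obtain ⟨hr0, hrlt⟩ := hr
          obtain ⟨hc0, hclt⟩ := hc
          obtain ⟨k, rfl⟩ : ∃ k : Nat, r = ↑k := ⟨r.toNat, (Int.toNat_of_nonneg hr0).symm⟩
          obtain ⟨j, rfl⟩ : ∃ j : Nat, c = ↑j := ⟨c.toNat, (Int.toNat_of_nonneg hc0).symm⟩
          have hk : k < G.length := by exact_mod_cast hrlt
          have hj : j < cols := by exact_mod_cast hclt
          have hjk : j < G[k].length := Nat.lt_of_lt_of_le hj (hshape G[k] (List.getElem_mem hk))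
          have hjt : j < (G[k].take cols).length := by rw [htlen k hk]; exact hj
          rw [hcell_iff k hk, PySem.List.pyGetD_natCast, List.getD_eq_getElem _ _ hjk]
          by_cases hpar : PySem.Int.mod ((k : Int) + (j : Int)) 2 = 0
          · rw [if_pos (beq_iff_eq.mpr hpar), beq_iff_eq]
            have hmem : G[k][j] ∈ st.1 := (hE _).mpr ⟨k, hk, j, hjt, hpar, htget k hk j hj⟩
            rw [hsing] at hmem
            simpa using hmem
          · rw [if_neg (fun h => hpar (beq_iff_eq.mp h)), bne_iff_ne]
            intro hva
            have hmem : G[k][j] ∈ st.2 := (hO _).mpr ⟨k, hk, j, hjt, hpar, htget k hk j hj⟩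
            exact hdisj a ha_mem (hva ▸ hmem)
      | inr hbrk =>
        -- the first row itself breaks the pattern: both programs return false
        obtain ⟨c0, hc0, hviol⟩ := hbrk
        rw [List.getD_eq_getElem _ _ hc0] at hviol
        have hgd0 : (a :: t).getD 0 0 = a := rfl
        rw [hgd0] at hviol
        have hc0t : c0 < ((G[0]'hGlen).take cols).length := by rw [htake0]; exact hc0
        have hv0 : ((G[0]'hGlen).take cols)[c0]'hc0t = (a :: t)[c0] := by
          simp only [htake0]
        -- A = false: cell (0, c0) fails inside row 0
        have hAfalse : ccA_loopR G a (cols : Int) (PySem.List.pyRange 0 (G.length : Int) 1) = false := by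
          rw [ccA_loopR_eq_all, List.all_eq_false]
          refine ⟨0, ?_, ?_⟩
          · rw [PySem.List.mem_pyRange_one]
            exact ⟨le_refl 0, by exact_mod_cast hGlen⟩
          · rw [ccA_loopC_eq_all, Bool.not_eq_true, List.all_eq_false]
            refine ⟨(c0 : Int), ?_, ?_⟩
            · rw [PySem.List.mem_pyRange_one]
              exact ⟨by positivity, by exact_mod_cast hc0⟩
            · have := hcell_iff 0 hGlen (c0 : Int)
              rw [Nat.cast_zero] at this
              rw [this, hrow0, PySem.List.pyGetD_natCast, List.getD_eq_getElem _ _ hc0]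
              have hpar0 : PySem.Int.mod ((0 : Int) + (c0 : Int)) 2 = ((c0 % 2 : Nat) : Int) := by
                rw [zero_add, pv_mod_two_natCast]
              rcases hviol with ⟨heq, hneq⟩ | ⟨hodd, heqv⟩
              · rw [hpar0, heq, Bool.not_eq_true]
                simp [hneq]
              · rw [hpar0, hodd, Bool.not_eq_true]
                simp [heqv]
        -- B = false: row 0's violation lands in the gathered sets
        have hBfalse : ((PySem.Set.len st.1 == 1) && PySem.Set.isdisjoint st.1 st.2) = false := by
          rw [Bool.eq_false_iff]
          intro htrue
          rw [Bool.and_eq_true] at htrue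
          obtain ⟨hlen1, hdisj⟩ := htrue
          have hsing : st.1 = [a] := by
            have hl1 : st.1.length = 1 := by
              simp only [PySem.Set.len, beq_iff_eq] at hlen1
              omega
            obtain ⟨x, hx⟩ := List.length_eq_one_iff.mp hl1
            rw [hx] at ha_mem
            simp at ha_mem
            rw [hx, ha_mem]
          rcases hviol with ⟨heven, hneq⟩ | ⟨hodd, heqv⟩
          · have hmem : (a :: t)[c0] ∈ st.1 := by
              refine (hE _).mpr ⟨0, hGlen, c0, hc0t, ?_, hv0⟩
              rw [Nat.cast_zero, zero_add, pv_mod_two_natCast, heven]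
              rfl
            rw [hsing] at hmem
            simp at hmem
            exact hneq hmem
          · have hmem : (a :: t)[c0] ∈ st.2 := by
              refine (hO _).mpr ⟨0, hGlen, c0, hc0t, ?_, hv0⟩
              rw [Nat.cast_zero, zero_add, pv_mod_two_natCast, hodd]
              decide
            rw [heqv] at hmem
            exact (Iff.mp (PySem.Set.isdisjoint_iff st.1 st.2) hdisj) a ha_mem hmem
        rw [hAfalse, hBfalse]
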